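-- pv_equiv track=rewrite | github.com/balmacefa/CRAUTOS | backend/scrapers/crautos_scraper.py | _parse_title
-- ===== SOURCE A (Python) =====
-- from typing import List, Dict, Optional
--
-- def _parse_title(title:  str) -> Dict:
--     """Parse car title to extract marca, modelo, año"""
--     parts = title.strip().split()
--
--     result = {
--         'marca': '',
--         'modelo': '',
--         'año': ''
--     }
--
--     if not parts:
--         return result
--
--     # First part is usually the brand
--     result['marca'] = parts[0]
--
--     # Last part that's a 4-digit number is usually the year
--     for i in range(len(parts) - 1, -1, -1):
--         if parts[i].isdigit() and len(parts[i]) == 4: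
--             result['año'] = parts[i]
--             # Everything between brand and year is the model
--             if i > 1:
--                 result['modelo'] = ' '.join(parts[1:i])
--             break
--
--     # If no year found, assume everything after brand is model
--     if not result['año'] and len(parts) > 1:
--         result['modelo'] = ' '.join(parts[1:])
--
--     return result
-- ===== SOURCE B (Python) =====
-- def _parse_title(title:  str):
--     """Single forward pass with a snapshot accumulator: when a 4-digit token is seen,
--     the year and the model-so-far are snapshotted; no backward scan, no slicing."""
--     parts = title.strip().split()
--     if not parts:
--         return {'marca': '', 'modelo': '', 'año': ''}
--     marca = parts[0]
--     año = marca if marca.isdigit() and len(marca) == 4 else ''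
--     modelo = ''
--     seen = []
--     for tok in parts[1:]:
--         if tok.isdigit() and len(tok) == 4:
--             año = tok
--             modelo = ' '.join(seen)
--         seen.append(tok)
--     if not año:
--         modelo = ' '.join(seen)
--     return {'marca': marca, 'modelo': modelo, 'año': año}
-- ===== Notes on version B (the rewrite author's own statement) =====
-- stated objective: alternative
-- what changed: B replaces A's backward break-out index scan and slice/join patch-up with a single forward fold over the tokens after the brand, carrying a snapshot accumulator: on each 4-digit token it snapshots the year and the model-so-far, so no indices, no backward range and no slicing are used.
import Mathlib
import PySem

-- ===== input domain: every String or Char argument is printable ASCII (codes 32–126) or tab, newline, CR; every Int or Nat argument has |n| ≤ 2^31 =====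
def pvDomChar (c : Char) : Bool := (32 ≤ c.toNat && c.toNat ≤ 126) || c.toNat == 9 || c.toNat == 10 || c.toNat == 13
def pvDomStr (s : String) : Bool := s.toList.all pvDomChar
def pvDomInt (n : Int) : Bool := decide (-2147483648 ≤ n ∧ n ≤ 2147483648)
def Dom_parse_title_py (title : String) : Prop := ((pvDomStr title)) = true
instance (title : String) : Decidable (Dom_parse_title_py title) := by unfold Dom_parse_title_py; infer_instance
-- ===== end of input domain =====

-- B replaces A's backward break-scan and slicing with a single forward fold that
-- snapshots (year, model-so-far) at each 4-digit token (objective: alternative, same cost).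

-- ===== PORT A =====
-- the backward for-loop with break: recursion over the countdown index list
def parseALoop (parts : List String) : List Int → String × String → String × String
  | [], st => st
  | i :: rest, st =>
      let p := PySem.List.pyGetD parts i ""
      if PySem.Str.strIsdigit p && PySem.Str.len p == 4 then
        (p, if 1 < i then PySem.Str.join " " (PySem.List.slice parts (some 1) (some i)) else st.2)
      else parseALoop parts rest st

def parse_title_py (title : String) : List (String × String) :=
  let parts := PySem.Str.split₀ (PySem.Str.strip title)
  if parts = [] then [("marca", ""), ("modelo", ""), ("año", "")]
  else
    let marca := PySem.List.pyGetD parts 0 ""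
    let st := parseALoop parts (PySem.List.pyRange ((parts.length : Int) - 1) (-1) (-1)) ("", "")
    let ano := st.1
    let modelo := if ano = "" && decide (1 < parts.length) then
        PySem.Str.join " " (PySem.List.slice parts (some 1) none) else st.2
    [("marca", marca), ("modelo", modelo), ("año", ano)]

-- ===== PORT B =====
-- one forward step of Source B's loop: state is (año, modelo, seen)
def parseBStep (st : String × String × List String) (t : String) : String × String × List String :=
  if PySem.Str.strIsdigit t && PySem.Str.len t == 4 then
    (t, PySem.Str.join " " st.2.2, st.2.2 ++ [t])
  else
    (st.1, st.2.1, st.2.2 ++ [t])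

def parse_title_py_alt (title : String) : List (String × String) :=
  let parts := PySem.Str.split₀ (PySem.Str.strip title)
  match parts with
  | [] => [("marca", ""), ("modelo", ""), ("año", "")]
  | p :: rest =>
    let a0 := if PySem.Str.strIsdigit p && PySem.Str.len p == 4 then p else ""
    let st := rest.foldl parseBStep (a0, "", [])
    let modelo := if st.1 = "" then PySem.Str.join " " st.2.2 else st.2.1
    [("marca", p), ("modelo", modelo), ("año", st.1)]

-- ===== PRECONDITION & SPEC =====
def Spec_parse_title_py (title : String) (out : List (String × String)) : Prop := out = parse_title_py_alt title
instance (title : String) (out : List (String × String)) : Decidable (Spec_parse_title_py title out) := by unfold Spec_parse_title_py; infer_instance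

-- ===== CLAIM (what is proved, stated in full; the proofs are below) =====
def Claim_equal_parse_title_py : Prop := ∀ (title : String), Dom_parse_title_py title → Spec_parse_title_py title (parse_title_py title)

-- ===== LEMMAS AND PROOFS =====

-- the index of the last 4-digit token among the first n tokens
def lastIdx (parts : List String) (n : Nat) : Option Int :=
  (((PySem.List.enumerate (parts.take n) 0).filter
      (fun ip => PySem.Str.strIsdigit ip.2 && PySem.Str.len ip.2 == 4)).map (·.1)).getLast?

lemma lastIdx_succ (parts : List String) (n : Nat) (hlt : n < parts.length) :
    lastIdx parts (n+1) =
      if PySem.Str.strIsdigit parts[n] && PySem.Str.len parts[n] == 4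
      then some (n : Int) else lastIdx parts n := by
  have hlen' : (List.take n parts).length = n := by
    rw [List.length_take]; omega
  unfold lastIdx
  rw [List.take_add_one, List.getElem?_eq_getElem hlt, Option.toList_some,
    PySem.List.enumerate_append, List.filter_append, List.map_append, hlen']
  rw [PySem.List.enumerate_cons, PySem.List.enumerate_nil]
  cases hm : (PySem.Str.strIsdigit parts[n] && PySem.Str.len parts[n] == 4) with
  | false =>
      rw [if_neg (by simp)]
      rw [List.filter_cons_of_neg (by simpa using hm), List.filter_nil, List.map_nil, List.append_nil]
  | true =>
      rw [if_pos (by simp)]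
      rw [List.filter_cons_of_pos (by simpa using hm), List.filter_nil, List.map_cons, List.map_nil]
      rw [List.getLast?_concat]
      simp

lemma lastIdx_append (l : List String) (t : String) (n : Nat) (hn : n ≤ l.length) :
    lastIdx (l ++ [t]) n = lastIdx l n := by
  unfold lastIdx
  rw [List.take_append_of_le_length hn]

lemma lastIdx_bounds (parts : List String) (n : Nat) (i : Int)
    (h : lastIdx parts n = some i) : 0 ≤ i ∧ i.toNat < n := by
  unfold lastIdx at h
  have hmem := List.mem_of_getLast? h
  obtain ⟨ip, hip, hfst⟩ := List.mem_map.mp hmem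
  obtain ⟨hen, _⟩ := List.mem_filter.mp hip
  obtain ⟨k, hk, hipk⟩ := (PySem.List.mem_enumerate_iff _ _ _).mp hen
  subst hipk
  simp only [zero_add] at hfst
  subst hfst
  have hkn : k < n := by
    have := hk; rw [List.length_take] at this; omega
  refine ⟨by positivity, ?_⟩
  simpa using hkn

-- A's backward loop returns the state at the last matching index
lemma loop_eq (parts : List String) (n : Nat) (hn : n ≤ parts.length) (st : String × String) :
    parseALoop parts (PySem.List.pyRange ((n : Int) - 1) (-1) (-1)) st =
      match lastIdx parts n with
      | none => st
      | some i => (PySem.List.pyGetD parts i "",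
          if 1 < i then PySem.Str.join " " (PySem.List.slice parts (some 1) (some i)) else st.2) := by
  induction n with
  | zero =>
      rw [show ((0:Nat):Int) - 1 = -1 by norm_num, PySem.List.pyRange_neg_one_eq_nil (by omega)]
      simp [parseALoop, lastIdx]
  | succ n ih =>
      have hlt : n < parts.length := by omega
      have h1 : ((n+1 : Nat) : Int) - 1 = (n : Int) := by push_cast; ring
      rw [h1, PySem.List.pyRange_neg_one_cons (by omega)]
      rw [lastIdx_succ parts n hlt]
      have hp : PySem.List.pyGetD parts ((n:Nat):Int) "" = parts[n] := by
        simp [PySem.List.pyGetD_natCast, List.getD_eq_getElem?_getD, List.getElem?_eq_getElem hlt]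
      have hih := ih (by omega)
      simp only [parseALoop, hp]
      split_ifs with hc <;> simp_all

-- a matched token has length 4, hence is nonempty
lemma lastIdx_nonempty (parts : List String) (i : Int)
    (h : lastIdx parts parts.length = some i) :
    PySem.List.pyGetD parts i "" ≠ "" := by
  unfold lastIdx at h
  rw [List.take_length] at h
  have hmem : i ∈ ((PySem.List.enumerate parts 0).filter
      (fun ip => PySem.Str.strIsdigit ip.2 && PySem.Str.len ip.2 == 4)).map (·.1) :=
    List.mem_of_getLast? h
  obtain ⟨ip, hip, hfst⟩ := List.mem_map.mp hmem
  obtain ⟨hen, hpred⟩ := List.mem_filter.mp hip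
  obtain ⟨k, hk, hipk⟩ := (PySem.List.mem_enumerate_iff _ _ _).mp hen
  subst hipk
  simp only [zero_add] at hfst
  subst hfst
  have hget : PySem.List.pyGetD parts ((k : Nat) : Int) "" = parts[k] := by
    simp [PySem.List.pyGetD_natCast, List.getD_eq_getElem?_getD, List.getElem?_eq_getElem hk]
  rw [hget]
  intro hcontra
  simp [hcontra, PySem.Str.len] at hpred

-- B's forward fold computes the same snapshot as the last matching index
lemma foldB_char (p : String) (rest : List String) :
    rest.foldl parseBStep ((if PySem.Str.strIsdigit p && PySem.Str.len p == 4 then p else ""), "",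
        ([] : List String)) =
      match lastIdx (p :: rest) (rest.length + 1) with
      | none => ("", "", rest)
      | some i => (PySem.List.pyGetD (p :: rest) i "",
          PySem.Str.join " " (rest.take (i.toNat - 1)), rest) := by
  induction rest using List.reverseRecOn with
  | nil =>
      have h0 : lastIdx (p :: ([]:List String)) 1 =
          if PySem.Str.strIsdigit p && PySem.Str.len p == 4 then some ((0:Nat) : Int) else lastIdx [p] 0 := by
        exact lastIdx_succ [p] 0 (by simp)
      have h00 : lastIdx [p] 0 = none := by unfold lastIdx; simp [PySem.List.enumerate_nil]
      rw [List.foldl_nil, show ([]:List String).length + 1 = 1 from rfl, h0, h00]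
      cases hm : (PySem.Str.strIsdigit p && PySem.Str.len p == 4) with
      | false => rfl
      | true =>
          simp only [reduceIte]
          rfl
  | append_singleton ts t ih =>
      rw [List.foldl_append, List.foldl_cons, List.foldl_nil, ih]
      have hlen : (ts ++ [t]).length + 1 = (ts.length + 1) + 1 := by simp
      rw [hlen, show p :: (ts ++ [t]) = (p :: ts) ++ [t] from rfl]
      have hget : ((p :: ts) ++ [t])[ts.length + 1]'(by simp) = t :=
        by simp
      rw [lastIdx_succ ((p :: ts) ++ [t]) (ts.length + 1) (by simp), hget,
        lastIdx_append (p :: ts) t (ts.length + 1) (by simp)]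
      have hpy : PySem.List.pyGetD ((p :: ts) ++ [t]) ((ts.length + 1 : Nat) : Int) "" = t := by
        rw [PySem.List.pyGetD_natCast, List.getD_eq_getElem?_getD,
          show ts.length + 1 = (p :: ts).length from rfl, List.getElem?_concat_length]
        rfl
      have htk : (ts ++ [t]).take (((ts.length + 1 : Nat) : Int).toNat - 1) = ts := by
        rw [Int.toNat_natCast, Nat.add_sub_cancel, List.take_left]
      unfold parseBStep
      cases hL : lastIdx (p :: ts) (ts.length + 1) with
      | none =>
          cases hm : (PySem.Str.strIsdigit t && PySem.Str.len t == 4) with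
          | true =>
              simp only [reduceIte]
              rw [hpy, htk]
          | false =>
              rfl
      | some i =>
          obtain ⟨hi0, hin⟩ := lastIdx_bounds _ _ _ hL
          have hi : ((i.toNat : Nat) : Int) = i := Int.toNat_of_nonneg hi0
          have hgeq : PySem.List.pyGetD ((p :: ts) ++ [t]) i "" = PySem.List.pyGetD (p :: ts) i "" := by
            rw [← hi, PySem.List.pyGetD_natCast, PySem.List.pyGetD_natCast,
              List.getD_eq_getElem?_getD, List.getD_eq_getElem?_getD,
              List.getElem?_append_left (by simp; omega)]
          have htk' : (ts ++ [t]).take (i.toNat - 1) = ts.take (i.toNat - 1) := by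
            rw [List.take_append_of_le_length (by omega)]
          cases hm : (PySem.Str.strIsdigit t && PySem.Str.len t == 4) with
          | true =>
              simp only [reduceIte]
              rw [hpy, htk]
          | false =>
              rw [if_neg (by decide), if_neg (by decide)]
              dsimp only
              rw [hgeq, htk']

theorem parse_title_py_spec : Claim_equal_parse_title_py := by
  intro title _
  unfold Spec_parse_title_py parse_title_py parse_title_py_alt
  cases hP : PySem.Str.split₀ (PySem.Str.strip title) with
  | nil => simp
  | cons p rest =>
    simp only [if_neg (List.cons_ne_nil p rest)]
    have hlen : (p :: rest).length = rest.length + 1 := by simp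
    rw [show ((p :: rest).length : Int) - 1 = ((rest.length + 1 : Nat) : Int) - 1 by rw [hlen]]
    rw [loop_eq (p :: rest) (rest.length + 1) (by simp)]
    rw [foldB_char]
    cases hL : lastIdx (p :: rest) (rest.length + 1) with
    | none =>
        simp only [PySem.List.pyGetD_zero_cons]
        rw [PySem.List.slice_from_one]
        cases rest with
        | nil => simp; decide
        | cons q qs => simp
    | some i =>
        obtain ⟨hi0, hin⟩ := lastIdx_bounds _ _ _ hL
        have hne : PySem.List.pyGetD (p :: rest) i "" ≠ "" := by
          apply lastIdx_nonempty
          rw [hlen]; exact hL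
        simp only [PySem.List.pyGetD_zero_cons]
        by_cases h1 : (1:Int) < i
        · have hsl : PySem.List.slice (p :: rest) (some 1) (some i) = rest.take (i.toNat - 1) := by
            have := PySem.List.slice_toNat (xs := p :: rest) (a := 1) (b := i) (by omega) hi0
            simpa using this
          simp [h1, hne, hsl]
        · have htk0 : rest.take (i.toNat - 1) = [] := by
            have : i.toNat - 1 = 0 := by omega
            simp [this]
          simp [h1, hne, htk0]
          decide
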